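-- pv_equiv track=rewrite | github.com/nvandeweijer/maintenance_status_cv | utils.py | balance_classes
-- ===== SOURCE A (Python) =====
-- from collections import Counter
--
-- def balance_classes(img_paths, labels):
--     classes: dict = {"excellent": 1, "bad": 0}
--     balanced_img_paths = []
--     balanced_labels = []
--
--     counts = Counter(labels)
--     min_class = min(counts, key=counts.get)
--     class_counts = {class_int: 0 for class_int in list(classes.values())}
--
--     for img_path, lab in zip(img_paths, labels):
--       if class_counts[lab] >= counts[min_class]:
--         continue
--       class_counts[lab] += 1
--       balanced_img_paths.append(img_path)
--       balanced_labels.append(lab)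
--
--     return balanced_img_paths, balanced_labels
-- ===== SOURCE B (Python) =====
-- from collections import Counter
--
--
-- def balance_classes(img_paths, labels):
--     # Cap = size of the smallest class (ValueError on empty labels, like A's min()).
--     cap = min(Counter(labels).values())
--     # Group the indices of the zipped region by class (KeyError on a label
--     # outside {0, 1}, like A's class_counts[lab]).
--     groups = {1: [], 0: []}
--     for i, (_, lab) in enumerate(zip(img_paths, labels)):
--         groups[lab].append(i)
--     # Keep the first `cap` indices of each class.
--     kept = set()
--     for idxs in groups.values():
--         kept.update(idxs[:cap])
--     # One pass over the original sequence preserves the interleaved order.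
--     balanced_img_paths = []
--     balanced_labels = []
--     for i, (img_path, lab) in enumerate(zip(img_paths, labels)):
--         if i in kept:
--             balanced_img_paths.append(img_path)
--             balanced_labels.append(lab)
--     return balanced_img_paths, balanced_labels
-- ===== Notes on version B (the rewrite author's own statement) =====
-- stated objective: alternative
-- what changed: Replaces A's single stateful pass with running per-class quota counters by a group-then-select decomposition: index the positions of each class, keep the first `cap` indices of every class as a set, and rebuild the output in one order-preserving pass.
import Mathlib
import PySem

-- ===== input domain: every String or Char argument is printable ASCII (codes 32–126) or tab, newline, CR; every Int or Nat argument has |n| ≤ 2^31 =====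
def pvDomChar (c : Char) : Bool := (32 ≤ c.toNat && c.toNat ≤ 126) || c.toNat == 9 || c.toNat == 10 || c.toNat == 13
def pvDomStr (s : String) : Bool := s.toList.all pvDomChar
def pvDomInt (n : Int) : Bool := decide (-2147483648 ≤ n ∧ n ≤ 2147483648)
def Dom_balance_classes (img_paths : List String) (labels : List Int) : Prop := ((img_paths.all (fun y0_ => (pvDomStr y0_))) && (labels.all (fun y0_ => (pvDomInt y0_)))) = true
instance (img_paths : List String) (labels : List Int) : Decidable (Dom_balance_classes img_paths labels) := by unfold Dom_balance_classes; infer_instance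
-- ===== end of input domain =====

-- B replaces A's single stateful quota-counting pass by a group-then-select decomposition
-- (index positions per class, keep the first `cap` of each, rebuild in one order-preserving
-- pass); alternative structure, same cost.

-- ===== PORT A =====
def balance_classes (img_paths : List String) (labels : List Int) : List String × List Int :=
  -- classes = {"excellent": 1, "bad": 0}: only its values [1, 0] are used (class_counts keys)
  let counts : PySem.Dict Int Int := PySem.Dict.counter labels
  -- min(counts, key=counts.get): first key of minimal count; `.getD 0` marks the empty-labels
  -- case, where Python's min raises ValueError (excluded by Pre_)
  let min_class : Int := (PySem.List.min? counts.keys (fun k => counts.getD k 0)).getD 0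
  let class_counts : PySem.Dict Int Int := (PySem.Dict.empty.insert 1 0).insert 0 0
  let r := (img_paths.zip labels).foldl
    (fun (st : PySem.Dict Int Int × List String × List Int) pl =>
      -- class_counts[lab] ported as getD _ 0: exact on Pre_ (the key is present);
      -- a missing key (label outside {0,1}) is Python's KeyError, excluded by Pre_
      if st.1.getD pl.2 0 ≥ counts.getD min_class 0 then st
      else (st.1.insert pl.2 (st.1.getD pl.2 0 + 1), st.2.1 ++ [pl.1], st.2.2 ++ [pl.2]))
    (class_counts, [], [])
  (r.2.1, r.2.2)

-- ===== PORT B =====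
def balance_classes_alt (img_paths : List String) (labels : List Int) : List String × List Int :=
  -- cap = min(Counter(labels).values()); `.getD 0` marks the empty-labels case,
  -- where Python's min raises ValueError (excluded by Pre_)
  let cap : Int := (PySem.List.min? (PySem.Dict.counter labels).values (fun v => v)).getD 0
  -- groups = {1: [], 0: []}; groups[lab].append(i) ported as modify with default []:
  -- exact on Pre_ (the key is present); a missing key is Python's KeyError, excluded by Pre_
  let groups : PySem.Dict Int (List Int) :=
    (PySem.List.enumerate (img_paths.zip labels)).foldl
      (fun d p => d.modify p.2.2 [] (fun g => g ++ [p.1]))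
      ((PySem.Dict.empty.insert 1 []).insert 0 [])
  -- kept = set(); for idxs in groups.values(): kept.update(idxs[:cap])
  let kept : PySem.Set Int :=
    groups.values.foldl (fun s idxs => PySem.Set.update s (PySem.List.slice idxs none (some cap)))
      PySem.Set.empty
  (PySem.List.enumerate (img_paths.zip labels)).foldl
    (fun (st : List String × List Int) p =>
      if p.1 ∈ kept then (st.1 ++ [p.2.1], st.2 ++ [p.2.2]) else st)
    ([], [])

-- ===== PRECONDITION & SPEC =====
-- Pre_ excludes exactly the inputs where A raises: empty labels (min() over an empty
-- Counter raises ValueError) and a label other than 0/1 in the zipped region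
-- (class_counts[lab] raises KeyError). B raises the same exceptions there.
def Pre_balance_classes (img_paths : List String) (labels : List Int) : Prop :=
  labels ≠ [] ∧ ∀ l ∈ labels.take img_paths.length, l = 0 ∨ l = 1
instance (img_paths : List String) (labels : List Int) : Decidable (Pre_balance_classes img_paths labels) := by unfold Pre_balance_classes; infer_instance

def pvWitness_balance_classes : List String × List Int := (["a", "b", "c", "d"], [0, 1, 0, 1])

def Spec_balance_classes (img_paths : List String) (labels : List Int) (out : List String × List Int) : Prop := out = balance_classes_alt img_paths labels
instance (img_paths : List String) (labels : List Int) (out : List String × List Int) : Decidable (Spec_balance_classes img_paths labels out) := by unfold Spec_balance_classes; infer_instance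

-- ===== CLAIM (what is proved, stated in full; the proofs are below) =====
def Claim_equal_balance_classes : Prop := ∀ (img_paths : List String) (labels : List Int), Dom_balance_classes img_paths labels → Pre_balance_classes img_paths labels → Spec_balance_classes img_paths labels (balance_classes img_paths labels)

-- ===== LEMMAS AND PROOFS =====

def core : List (String × Int) → Int → Int → List String × List Int
  | [], _, _ => ([], [])
  | (p, l) :: t, b0, b1 =>
    if l = 0 then
      if b0 ≤ 0 then core t b0 b1
      else ((core t (b0 - 1) b1).1.cons p, (core t (b0 - 1) b1).2.cons l)
    else
      if b1 ≤ 0 then core t b0 b1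
      else ((core t b0 (b1 - 1)).1.cons p, (core t b0 (b1 - 1)).2.cons l)

theorem mem_zip_snd_take {α β : Type} (ip : List α) (ls : List β) :
    ∀ pl ∈ ip.zip ls, pl.2 ∈ ls.take ip.length := by
  induction ip generalizing ls with
  | nil => simp
  | cons a ip ih =>
    cases ls with
    | nil => simp
    | cons b ls =>
      intro pl hpl
      simp only [List.zip_cons_cons, List.mem_cons] at hpl
      rcases hpl with h | h
      · simp [h]
      · simp only [List.length_cons, List.take_succ_cons, List.mem_cons]
        exact Or.inr (ih ls pl h)

theorem A_fold (cap : Int) (t : List (String × Int))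
    (hlab : ∀ pl ∈ t, pl.2 = 0 ∨ pl.2 = 1) :
    ∀ (cc : PySem.Dict Int Int) (bp : List String) (bl : List Int),
    (t.foldl
      (fun (st : PySem.Dict Int Int × List String × List Int) pl =>
        if st.1.getD pl.2 0 ≥ cap then st
        else (st.1.insert pl.2 (st.1.getD pl.2 0 + 1), st.2.1 ++ [pl.1], st.2.2 ++ [pl.2]))
      (cc, bp, bl)).2
    = (bp ++ (core t (cap - cc.getD 0 0) (cap - cc.getD 1 0)).1,
       bl ++ (core t (cap - cc.getD 0 0) (cap - cc.getD 1 0)).2) := by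
  induction t with
  | nil => simp [core]
  | cons hd t ih =>
    obtain ⟨p, l⟩ := hd
    intro cc bp bl
    have hl : l = 0 ∨ l = 1 := hlab (p, l) (List.mem_cons_self ..)
    have ih' := ih (fun pl h => hlab pl (List.mem_cons_of_mem _ h))
    rcases hl with rfl | rfl
    · by_cases h : cc.getD 0 0 ≥ cap
      · simp only [List.foldl_cons, if_pos h, ih']
        have hb : cap - cc.getD 0 0 ≤ 0 := by omega
        simp [core, hb]
      · simp only [List.foldl_cons, if_neg h, ih']
        have h0 : (cc.insert 0 (cc.getD 0 0 + 1)).getD 0 0 = cc.getD 0 0 + 1 :=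
          PySem.Dict.getD_insert_self ..
        have h1 : (cc.insert 0 (cc.getD 0 0 + 1)).getD 1 0 = cc.getD 1 0 :=
          PySem.Dict.getD_insert_of_ne _ _ _ (by decide)
        have hb : ¬ (cap - cc.getD 0 0 ≤ 0) := by omega
        have he : cap - (cc.getD 0 0 + 1) = cap - cc.getD 0 0 - 1 := by ring
        simp [core, hb, h0, h1, he]
    · by_cases h : cc.getD 1 0 ≥ cap
      · simp only [List.foldl_cons, if_pos h, ih']
        have hb : cap - cc.getD 1 0 ≤ 0 := by omega
        simp [core, hb]
      · simp only [List.foldl_cons, if_neg h, ih']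
        have h1 : (cc.insert 1 (cc.getD 1 0 + 1)).getD 1 0 = cc.getD 1 0 + 1 :=
          PySem.Dict.getD_insert_self ..
        have h0 : (cc.insert 1 (cc.getD 1 0 + 1)).getD 0 0 = cc.getD 0 0 :=
          PySem.Dict.getD_insert_of_ne _ _ _ (by decide)
        have hb : ¬ (cap - cc.getD 1 0 ≤ 0) := by omega
        have he : cap - (cc.getD 1 0 + 1) = cap - cc.getD 1 0 - 1 := by ring
        simp [core, hb, h0, h1, he]

/-- A's `counts[min(counts, key=counts.get)]` equals B's `min(counts.values())`,
and both equal the count of some element of `labels` (hence are ≥ 1). -/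
theorem cap_eq (labels : List Int) (hne : labels ≠ []) :
    ∃ m ∈ labels,
      (PySem.Dict.counter labels).getD
          ((PySem.List.min? (PySem.Dict.counter labels).keys
            (fun k => (PySem.Dict.counter labels).getD k 0)).getD 0) 0
        = (labels.count m : Int)
      ∧ ((PySem.List.min? (PySem.Dict.counter labels).values (fun v => v)).getD 0 : Int)
        = (labels.count m : Int) := by
  set d := PySem.Dict.counter labels with hd
  have hkeys : d.keys = PySem.Set.ofList labels := PySem.Dict.keys_counter labels
  have hnodup : d.keys.Nodup := PySem.Dict.nodup_keys_counter labels
  have hkne : d.keys ≠ [] := by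
    intro h
    rcases List.exists_mem_of_ne_nil labels hne with ⟨x, hx⟩
    have : x ∈ d.keys := by rw [hkeys]; exact (PySem.Set.mem_ofList _ _).mpr hx
    simp [h] at this
  -- the key-side minimum
  obtain ⟨m, hm⟩ : ∃ m, PySem.List.min? d.keys (fun k => d.getD k 0) = some m := by
    cases h : PySem.List.min? d.keys (fun k => d.getD k 0) with
    | none => exact absurd ((PySem.List.min?_eq_none_iff _ _).mp h) hkne
    | some m => exact ⟨m, rfl⟩
  have hmmem : m ∈ d.keys := PySem.List.min?_mem hm
  have hmmin : ∀ y ∈ d.keys, d.getD m 0 ≤ d.getD y 0 := PySem.List.min?_isMin hm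
  have hvals : d.values = d.keys.map (fun k => d.getD k 0) :=
    PySem.Dict.values_eq_map_keys d hnodup 0
  -- the value-side minimum
  obtain ⟨v, hv⟩ : ∃ v, PySem.List.min? d.values (fun v => v) = some v := by
    cases h : PySem.List.min? d.values (fun v => v) with
    | none =>
      have := (PySem.List.min?_eq_none_iff _ _).mp h
      rw [hvals, List.map_eq_nil_iff] at this
      exact absurd this hkne
    | some v => exact ⟨v, rfl⟩
  have hvmem : v ∈ d.values := PySem.List.min?_mem hv
  have hvmin : ∀ y ∈ d.values, v ≤ y := PySem.List.min?_isMin hv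
  obtain ⟨k0, hk0, rfl⟩ : ∃ k0 ∈ d.keys, d.getD k0 0 = v := by
    rw [hvals] at hvmem; simpa using hvmem
  have h1 : d.getD m 0 ≤ d.getD k0 0 := hmmin _ hk0
  have h2 : d.getD k0 0 ≤ d.getD m 0 :=
    hvmin _ (by rw [hvals]; exact List.mem_map_of_mem hmmem)
  have heq : d.getD k0 0 = d.getD m 0 := le_antisymm h2 h1
  refine ⟨m, ?_, ?_, ?_⟩
  · rw [hkeys] at hmmem; exact (PySem.Set.mem_ofList _ _).mp hmmem
  · rw [hm]; simp only [Option.getD_some]; simp [hd, PySem.Dict.getD_counter]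
  · rw [hv]; simp only [Option.getD_some]; rw [heq]; simp [hd, PySem.Dict.getD_counter]

/-- The index list B's grouping loop stores for class `lab` (enumeration starting at `n`). -/
def gIdx (lab : Int) (z : List (String × Int)) (n : Int) : List Int :=
  ((PySem.List.enumerate z n).filter (fun p => p.2.2 == lab)).map (fun p => p.1)

theorem gIdx_cons (lab : Int) (p : String) (l : Int) (t : List (String × Int)) (n : Int) :
    gIdx lab ((p, l) :: t) n
      = if l == lab then n :: gIdx lab t (n + 1) else gIdx lab t (n + 1) := by
  simp only [gIdx, PySem.List.enumerate_cons, List.filter_cons]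
  by_cases h : l = lab <;> simp [h]

theorem gIdx_lb (lab : Int) (z : List (String × Int)) :
    ∀ (n : Int), ∀ m ∈ gIdx lab z n, n ≤ m := by
  induction z with
  | nil => simp [gIdx]
  | cons hd t ih =>
    obtain ⟨p, l⟩ := hd
    intro n m hm
    rw [gIdx_cons] at hm
    by_cases h : l = lab
    · rw [if_pos (by simp [h])] at hm
      rw [List.mem_cons] at hm
      rcases hm with rfl | hm
      · exact le_rfl
      · have := ih (n + 1) m hm; omega
    · rw [if_neg (by simp [h])] at hm
      have := ih (n + 1) m hm; omega

theorem gIdx_take_mem (lab : Int) (z : List (String × Int)) :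
    ∀ (n : Int) (k c : Nat) (hk : k < z.length),
    ((n + (k : Int)) ∈ (gIdx lab z n).take c
      ↔ (z[k].2 = lab ∧ (z.take k).countP (fun q => q.2 == lab) < c)) := by
  induction z with
  | nil => intro n k c hk; simp at hk
  | cons hd t ih =>
    obtain ⟨p, l⟩ := hd
    intro n k c hk
    rw [gIdx_cons]
    by_cases h : l = lab
    · subst h
      rw [if_pos (by simp)]
      cases k with
      | zero =>
        cases c with
        | zero => simp
        | succ c => simp
      | succ k =>
        have hk' : k < t.length := by simpa using hk
        cases c with
        | zero =>
          simp only [List.take_zero, List.not_mem_nil, false_iff, not_and, not_lt]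
          intro _
          simp [List.take_succ_cons]
        | succ c =>
          simp only [List.take_succ_cons, List.mem_cons]
          have hne : ¬ (n + ((k + 1 : Nat) : Int) = n) := by push_cast; omega
          have harith : n + ((k + 1 : Nat) : Int) = (n + 1) + (k : Int) := by push_cast; ring
          rw [harith]
          simp only [harith ▸ hne, false_or]
          rw [ih (n + 1) k c hk']
          simp only [List.getElem_cons_succ, List.countP_cons]
          constructor
          · rintro ⟨h1, h2⟩; exact ⟨h1, by simp; omega⟩
          · rintro ⟨h1, h2⟩; refine ⟨h1, ?_⟩; simp at h2; omega
    · have hbe : (l == lab) = false := beq_eq_false_iff_ne.mpr h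
      rw [if_neg (by simp [hbe])]
      cases k with
      | zero =>
        simp only [List.getElem_cons_zero]
        constructor
        · intro hmem
          have := gIdx_lb lab t (n + 1) _ (List.mem_of_mem_take hmem)
          omega
        · rintro ⟨h1, _⟩; exact absurd h1 h
      | succ k =>
        have hk' : k < t.length := by simpa using hk
        have harith : n + ((k + 1 : Nat) : Int) = (n + 1) + (k : Int) := by push_cast; ring
        rw [harith, ih (n + 1) k c hk']
        simp [List.take_succ_cons, hbe]

/-- B's final pass telescopes to `core` when `kept`-membership says
"the running count of my class is below my remaining budget". -/
theorem B_fold (kept : List Int) (t : List (String × Int))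
    (hlab : ∀ pl ∈ t, pl.2 = 0 ∨ pl.2 = 1) :
    ∀ (n : Int) (b0 b1 : Int) (bp : List String) (bl : List Int),
    (∀ (k : Nat) (hk : k < t.length),
        ((n + (k : Int)) ∈ kept ↔
          (((t.take k).countP (fun q => q.2 == t[k].2) : Int)
            < (if t[k].2 = 0 then b0 else b1)))) →
    ((PySem.List.enumerate t n).foldl
      (fun (st : List String × List Int) p =>
        if p.1 ∈ kept then (st.1 ++ [p.2.1], st.2 ++ [p.2.2]) else st)
      (bp, bl))
    = (bp ++ (core t b0 b1).1, bl ++ (core t b0 b1).2) := by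
  induction t with
  | nil => intro n b0 b1 bp bl H; simp [core, PySem.List.enumerate_nil]
  | cons hd t ih =>
    obtain ⟨p, l⟩ := hd
    intro n b0 b1 bp bl H
    have hlab' : ∀ pl ∈ t, pl.2 = 0 ∨ pl.2 = 1 :=
      fun pl h => hlab pl (List.mem_cons_of_mem _ h)
    have H0 : (n ∈ kept ↔ 0 < (if l = 0 then b0 else b1)) := by
      have := H 0 (by simp)
      simpa using this
    -- the shifted hypothesis, for any pair of updated budgets
    have Hshift : ∀ (k : Nat) (hk : k < t.length),
        ((n + 1 + (k : Int)) ∈ kept ↔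
          ((((p, l) :: t).take (k + 1)).countP (fun q => q.2 == t[k].2) : Int)
            < (if t[k].2 = 0 then b0 else b1)) := by
      intro k hk
      have harith : n + ((k + 1 : Nat) : Int) = n + 1 + (k : Int) := by push_cast; ring
      have H1 := H (k + 1) (by simpa using hk)
      rw [harith] at H1
      simpa using H1
    have hl : l = 0 ∨ l = 1 := hlab (p, l) (List.mem_cons_self ..)
    rw [PySem.List.enumerate_cons, List.foldl_cons]
    rcases hl with rfl | rfl
    · by_cases hb : b0 ≤ 0
      · have hnk : n ∉ kept := by rw [H0]; simp; omega
        rw [if_neg hnk]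
        rw [ih hlab' (n + 1) b0 b1 bp bl ?_]
        · have : core ((p, (0:Int)) :: t) b0 b1 = core t b0 b1 := by
            simp [core, hb]
          rw [this]
        · intro k hk
          have H1 := Hshift k hk
          simp only [List.take_succ_cons, List.countP_cons] at H1
          rw [H1]
          rcases hlab' t[k] (List.getElem_mem hk) with h0 | h0 <;>
            simp only [h0] <;> simp <;> omega
      · have hnk : n ∈ kept := by rw [H0]; simp; omega
        rw [if_pos hnk]
        rw [ih hlab' (n + 1) (b0 - 1) b1 (bp ++ [p]) (bl ++ [0]) ?_]
        · have : core ((p, (0:Int)) :: t) b0 b1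
              = ((core t (b0 - 1) b1).1.cons p, (core t (b0 - 1) b1).2.cons (0:Int)) := by
            simp [core, hb]
          rw [this]
          simp
        · intro k hk
          have H1 := Hshift k hk
          simp only [List.take_succ_cons, List.countP_cons] at H1
          rw [H1]
          rcases hlab' t[k] (List.getElem_mem hk) with h0 | h0 <;>
            simp only [h0] <;> simp <;> omega
    · by_cases hb : b1 ≤ 0
      · have hnk : n ∉ kept := by rw [H0]; simp; omega
        rw [if_neg hnk]
        rw [ih hlab' (n + 1) b0 b1 bp bl ?_]
        · have : core ((p, (1:Int)) :: t) b0 b1 = core t b0 b1 := by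
            simp [core, hb]
          rw [this]
        · intro k hk
          have H1 := Hshift k hk
          simp only [List.take_succ_cons, List.countP_cons] at H1
          rw [H1]
          rcases hlab' t[k] (List.getElem_mem hk) with h0 | h0 <;>
            simp only [h0] <;> simp <;> omega
      · have hnk : n ∈ kept := by rw [H0]; simp; omega
        rw [if_pos hnk]
        rw [ih hlab' (n + 1) b0 (b1 - 1) (bp ++ [p]) (bl ++ [1]) ?_]
        · have : core ((p, (1:Int)) :: t) b0 b1
              = ((core t b0 (b1 - 1)).1.cons p, (core t b0 (b1 - 1)).2.cons (1:Int)) := by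
            simp [core, hb]
          rw [this]
          simp
        · intro k hk
          have H1 := Hshift k hk
          simp only [List.take_succ_cons, List.countP_cons] at H1
          rw [H1]
          rcases hlab' t[k] (List.getElem_mem hk) with h0 | h0 <;>
            simp only [h0] <;> simp <;> omega

theorem set_update_of_forall_mem {α : Type} [BEq α] [LawfulBEq α]
    (xs : List α) (s : PySem.Set α) (h : ∀ x ∈ xs, x ∈ s) : PySem.Set.update s xs = s := by
  induction xs generalizing s with
  | nil => rfl
  | cons x xs ih =>
    have : PySem.Set.update s (x :: xs) = PySem.Set.update (PySem.Set.add s x) xs := rfl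
    rw [this, PySem.Set.add_of_mem (h x (List.mem_cons_self ..))]
    exact ih s (fun y hy => h y (List.mem_cons_of_mem _ hy))

theorem main_spec : ∀ (ip : List String) (ls : List Int),
    (ls ≠ [] ∧ ∀ l ∈ ls.take ip.length, l = 0 ∨ l = 1) →
    balance_classes ip ls = balance_classes_alt ip ls := by
  intro ip ls ⟨hne, htake⟩
  have hlab : ∀ pl ∈ ip.zip ls, pl.2 = 0 ∨ pl.2 = 1 :=
    fun pl h => htake pl.2 (mem_zip_snd_take ip ls pl h)
  obtain ⟨m, hm, hA, hB⟩ := cap_eq ls hne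
  have hcap1 : (1 : Int) ≤ (ls.count m : Int) := by
    have := List.count_pos_iff.mpr hm
    exact_mod_cast this
  -- ===== A side =====
  have hAside : balance_classes ip ls
      = ((core (ip.zip ls) (ls.count m) (ls.count m)).1,
         (core (ip.zip ls) (ls.count m) (ls.count m)).2) := by
    simp only [balance_classes]
    rw [A_fold _ _ hlab]
    rw [hA]
    have e0 : ((PySem.Dict.empty.insert (1:Int) (0:Int)).insert 0 0).getD 0 0 = 0 := by decide
    have e1 : ((PySem.Dict.empty.insert (1:Int) (0:Int)).insert 0 0).getD 1 0 = 0 := by decide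
    rw [e0, e1]
    simp
  rw [hAside]
  simp only [balance_classes_alt]
  rw [hB]
  -- groups.getD c [] is the ordered index list of class c
  have hgroups : ∀ c : Int,
      ((PySem.List.enumerate (ip.zip ls)).foldl
        (fun d p => d.modify p.2.2 [] (fun g => g ++ [p.1]))
        ((PySem.Dict.empty.insert 1 []).insert 0 [])).getD c []
      = gIdx c (ip.zip ls) 0 := by
    intro c
    have hstep : (PySem.List.enumerate (ip.zip ls)).foldl
          (fun d p => d.modify p.2.2 [] (fun g => g ++ [p.1]))
          ((PySem.Dict.empty.insert 1 []).insert 0 [])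
        = ((PySem.List.enumerate (ip.zip ls)).map (fun p => (p.2.2, p.1))).foldl
            (fun (d : PySem.Dict Int (List Int)) (q : Int × Int) =>
              d.modify q.1 [] (fun x => x ++ [q.2]))
            ((PySem.Dict.empty.insert 1 []).insert 0 []) := by
      rw [List.foldl_map]
    have hinit : ((PySem.Dict.empty.insert (1 : Int) ([] : List Int)).insert 0 []).getD c []
        = [] := by
      rw [PySem.Dict.getD_insert, PySem.Dict.getD_insert]
      split_ifs <;> simp [PySem.Dict.getD_empty]
    rw [hstep, PySem.Dict.getD_foldl_modify_append, hinit, List.filter_map, List.map_map]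
    rfl
  have hkeys : ((PySem.List.enumerate (ip.zip ls)).foldl
        (fun d p => d.modify p.2.2 [] (fun g => g ++ [p.1]))
        ((PySem.Dict.empty.insert 1 []).insert 0 [])).keys = [1, 0] := by
    rw [PySem.Dict.keys_foldl_modify_key (PySem.List.enumerate (ip.zip ls))
        (fun p => p.2.2) [] (fun _ p => fun g => g ++ [p.1])]
    have hik : ((PySem.Dict.empty.insert (1 : Int) ([] : List Int)).insert 0 []).keys
        = [1, 0] := by decide
    rw [hik]
    apply set_update_of_forall_mem
    intro x hx
    obtain ⟨p, hp, rfl⟩ := List.mem_map.mp hx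
    obtain ⟨k, hk, rfl⟩ := (PySem.List.mem_enumerate_iff _ _ _).mp hp
    show (ip.zip ls)[k].2 ∈ [1, 0]
    rcases hlab (ip.zip ls)[k] (List.getElem_mem hk) with h | h <;> rw [h] <;> decide
  have hnodk : ((PySem.List.enumerate (ip.zip ls)).foldl
        (fun d p => d.modify p.2.2 [] (fun g => g ++ [p.1]))
        ((PySem.Dict.empty.insert 1 []).insert 0 [])).keys.Nodup := by
    rw [hkeys]; decide
  have hvals : ((PySem.List.enumerate (ip.zip ls)).foldl
        (fun d p => d.modify p.2.2 [] (fun g => g ++ [p.1]))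
        ((PySem.Dict.empty.insert 1 []).insert 0 [])).values
      = [gIdx 1 (ip.zip ls) 0, gIdx 0 (ip.zip ls) 0] := by
    rw [PySem.Dict.values_eq_map_keys _ hnodk [], hkeys]
    simp [hgroups 1, hgroups 0]
  rw [hvals]
  -- the kept set
  have hslice : ∀ g : List Int,
      PySem.List.slice g none (some ((ls.count m : Nat) : Int)) = g.take (ls.count m) := by
    intro g
    rw [PySem.List.slice_to _ (by positivity)]
    simp
  simp only [List.foldl_cons, List.foldl_nil, hslice]
  set kept : PySem.Set Int :=
    PySem.Set.update (PySem.Set.update PySem.Set.empty ((gIdx 1 (ip.zip ls) 0).take (ls.count m)))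
      ((gIdx 0 (ip.zip ls) 0).take (ls.count m)) with hkept
  have hmemkept : ∀ i : Int, i ∈ kept ↔
      i ∈ (gIdx 1 (ip.zip ls) 0).take (ls.count m)
      ∨ i ∈ (gIdx 0 (ip.zip ls) 0).take (ls.count m) := by
    intro i
    rw [hkept, PySem.Set.mem_update, PySem.Set.mem_update]
    simp [PySem.Set.empty]
  rw [B_fold kept (ip.zip ls) hlab 0 (ls.count m) (ls.count m) [] [] ?_]
  · simp
  · intro k hk
    rw [hmemkept]
    have g1iff := gIdx_take_mem 1 (ip.zip ls) 0 k (ls.count m) hk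
    have g0iff := gIdx_take_mem 0 (ip.zip ls) 0 k (ls.count m) hk
    rw [ite_self]
    rcases hlab (ip.zip ls)[k] (List.getElem_mem hk) with h0 | h0 <;>
      rw [h0] at g1iff g0iff ⊢ <;> rw [g1iff, g0iff] <;> simp

-- ===== VERDICT (by name: the statement is the Claim_ definition above) =====
theorem balance_classes_spec : Claim_equal_balance_classes := by
  intro img_paths labels _hdom hpre
  exact main_spec img_paths labels hpre
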